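-- pv_equiv track=rewrite | github.com/pypi-data/pypi-mirror-391 | packages/firedrake-fiat/firedrake_fiat-2025.10.1-py3-none-any.whl/FIAT/SminusDiv.py | choose_ijk_total
-- ===== SOURCE A (Python) =====
-- def choose_ijk_total(degree):
--     top = 1
--     for i in range(1, 2 + degree + 1):
--         top = i * top
--     bottom = 1
--     for i in range(1, degree + 1):
--         bottom = i * bottom
--     return top // (2 * bottom)
-- ===== SOURCE B (Python) =====
-- def choose_ijk_total(degree):
--     # closed form: (degree+2)!/(2*degree!) = C(degree+2, 2) = (degree+1)(degree+2)/2
--     return (degree + 1) * (degree + 2) // 2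
-- ===== Notes on version B (the rewrite author's own statement) =====
-- stated objective: faster
-- what changed: replaces the two factorial-building loops and big-integer division by the closed-form triangular number (degree+1)*(degree+2)//2
-- outside the precondition, e.g. on choose_ijk_total(-3): A returns 0, B returns 1
import Mathlib
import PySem

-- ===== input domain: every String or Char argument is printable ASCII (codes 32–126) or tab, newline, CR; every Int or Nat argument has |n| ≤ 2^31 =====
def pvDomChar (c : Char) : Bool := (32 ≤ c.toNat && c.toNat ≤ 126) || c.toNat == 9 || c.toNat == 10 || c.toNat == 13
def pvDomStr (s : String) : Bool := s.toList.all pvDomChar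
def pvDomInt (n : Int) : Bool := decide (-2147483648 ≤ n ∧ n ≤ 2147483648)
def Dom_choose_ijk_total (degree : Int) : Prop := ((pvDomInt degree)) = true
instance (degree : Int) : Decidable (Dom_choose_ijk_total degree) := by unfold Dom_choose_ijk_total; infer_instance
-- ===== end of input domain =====

-- B replaces A's two factorial loops by the O(1) closed form (degree+1)*(degree+2)//2.

-- ===== PORT A =====
def choose_ijk_total (degree : Int) : Int :=
  let top := (PySem.List.pyRange 1 (2 + degree + 1) 1).foldl (fun t i => i * t) 1
  let bottom := (PySem.List.pyRange 1 (degree + 1) 1).foldl (fun b i => i * b) 1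
  PySem.Int.floordiv top (2 * bottom)

-- ===== PORT B =====
def choose_ijk_total_alt (degree : Int) : Int :=
  PySem.Int.floordiv ((degree + 1) * (degree + 2)) 2

-- ===== PRECONDITION & SPEC =====
-- Pre_ restricts to the function's natural domain of nonnegative polynomial degrees (the
-- FIAT element degree); for negative degree the combinatorial count is not meaningful and
-- A's empty loops simply yield 0 there.
def Pre_choose_ijk_total (degree : Int) : Prop := 0 ≤ degree
instance (degree : Int) : Decidable (Pre_choose_ijk_total degree) := by unfold Pre_choose_ijk_total; infer_instance
def pvWitness_choose_ijk_total : Int := (3)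

def Spec_choose_ijk_total (degree : Int) (out : Int) : Prop := out = choose_ijk_total_alt degree
instance (degree : Int) (out : Int) : Decidable (Spec_choose_ijk_total degree out) := by unfold Spec_choose_ijk_total; infer_instance

-- ===== CLAIM (what is proved, stated in full; the proofs are below) =====
def Claim_equal_choose_ijk_total : Prop := ∀ (degree : Int), Dom_choose_ijk_total degree → Pre_choose_ijk_total degree → Spec_choose_ijk_total degree (choose_ijk_total degree)

-- ===== LEMMAS AND PROOFS =====

-- A's loop over range(1, k+1) computes k!.
theorem foldl_pyRange_factorial (k : Nat) :
    (PySem.List.pyRange 1 ((k : Int) + 1) 1).foldl (fun t i => i * t) 1 = (Nat.factorial k : Int) := by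
  induction k with
  | zero => simp [PySem.List.pyRange, Nat.factorial]
  | succ n ih =>
      have h : (1 : Int) ≤ (n : Int) + 1 := by omega
      have : ((n : Int) + 1 + 1) = (((n : Int) + 1) + 1) := by ring
      rw [show ((n.succ : Int) + 1) = (((n : Int) + 1) + 1) by push_cast; ring,
          PySem.List.pyRange_one_succ_right h, List.foldl_append, ih]
      simp [Nat.factorial]

theorem choose_ijk_total_spec' (degree : Int) (h : 0 ≤ degree) :
    choose_ijk_total degree = choose_ijk_total_alt degree := by
  obtain ⟨n, rfl⟩ := Int.eq_ofNat_of_zero_le h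
  unfold choose_ijk_total choose_ijk_total_alt
  have h2 : (2 + (n : Int) + 1) = ((n + 2 : Nat) : Int) + 1 := by push_cast; ring
  rw [h2, foldl_pyRange_factorial (n + 2), foldl_pyRange_factorial n]
  -- (n+2)! = (n+1)*(n+2)*n!, and (n+1)*(n+2) = 2*c for some c
  have heven : Even (((n : Int) + 1) * ((n : Int) + 2)) := by
    rcases Int.even_or_odd (n : Int) with he | ho
    · obtain ⟨m, hm⟩ := he
      exact ⟨(2 * m + 1) * (m + 1), by rw [hm]; ring⟩
    · obtain ⟨m, hm⟩ := ho
      exact ⟨(m + 1) * (2 * m + 3), by rw [hm]; ring⟩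
  obtain ⟨c, hc⟩ := heven
  have hfact : (Nat.factorial (n + 2) : Int) = ((n : Int) + 1) * ((n : Int) + 2) * (Nat.factorial n : Int) := by
    have := Nat.factorial_succ (n + 1)
    have := Nat.factorial_succ n
    push_cast [Nat.factorial_succ]
    ring
  have hne : (2 * (Nat.factorial n : Int)) ≠ 0 := by
    have := Nat.factorial_pos n
    positivity
  have hL : (Nat.factorial (n + 2) : Int) = (2 * (Nat.factorial n : Int)) * c := by
    rw [hfact, hc]; ring
  have hR : ((n : Int) + 1) * ((n : Int) + 2) = 2 * c := by rw [hc]; ring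
  rw [hL, hR]
  unfold PySem.Int.floordiv
  rw [Int.mul_fdiv_cancel_left _ hne, Int.mul_fdiv_cancel_left _ (by norm_num)]

-- ===== VERDICT (by name: the statement is the Claim_ definition above) =====
theorem choose_ijk_total_spec : Claim_equal_choose_ijk_total := by
  intro degree _ hpre
  exact choose_ijk_total_spec' degree hpre
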